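-- pv_equiv track=rewrite | github.com/namnx228/CTF-Writeup | writeup/malaisia/run.py | transform
-- ===== SOURCE A (Python) =====
-- def qq(x, y):
--     return (2 * x + 3 * y + 29) % 256
--
-- def transform(pixelinfo):
--     pixelreverse = [pixelinfo[len(pixelinfo)-1-i] for i in range(len(pixelinfo))]
--     out = [pixelinfo[i] for i in range(len(pixelinfo))]
--     for i in range(len(pixelinfo)):
--         out[0] = qq(pixelreverse[i], out[0])
--         for j in range(1,len(pixelinfo)):
--             out[j] = qq(out[j-1], out[j])
--     return out
-- ===== SOURCE B (Python) =====
-- def transform(pixelinfo):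
--     # Band closed form per sweep: working mod 256, 2**8 == 0, so each swept value
--     # is a width-8 window sum with binomial-free powers of 2 -- no carried accumulator.
--     out = list(pixelinfo)
--     for r in reversed(pixelinfo):
--         new = []
--         for j in range(len(out)):
--             v = 2 ** (j + 1) * r if j <= 6 else 0
--             for t in range(min(j, 7) + 1):
--                 v += 2 ** t * (3 * out[j - t] + 29)
--             new.append(v % 256)
--         out = new
--     return out
-- ===== Notes on version B (the rewrite author's own statement) =====
-- stated objective: alternative
-- what changed: Replaced A's in-place sequential carry-chain sweep (each cell updated from the just-updated previous cell) by a per-element closed form: since 2^8 = 0 mod 256 the recurrence telescopes to a width-8 banded window sum, so every output cell of a sweep is computed independently from the previous sweep's values, with no in-sweep data dependency.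
import Mathlib
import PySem

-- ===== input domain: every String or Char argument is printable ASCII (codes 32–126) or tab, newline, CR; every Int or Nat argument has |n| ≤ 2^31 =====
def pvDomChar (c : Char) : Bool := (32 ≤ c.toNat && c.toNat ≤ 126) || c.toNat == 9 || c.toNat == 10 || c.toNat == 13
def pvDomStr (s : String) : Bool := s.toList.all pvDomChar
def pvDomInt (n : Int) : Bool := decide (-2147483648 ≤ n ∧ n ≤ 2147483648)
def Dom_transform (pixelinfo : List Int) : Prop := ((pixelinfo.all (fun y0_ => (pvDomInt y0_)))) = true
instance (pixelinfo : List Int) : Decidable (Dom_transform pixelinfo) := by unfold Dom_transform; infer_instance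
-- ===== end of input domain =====

-- B replaces A's sequential carry-chain sweep by a per-element width-8 band closed form
-- (2^8 ≡ 0 mod 256), removing the in-sweep data dependency; alternative algorithm, same O(n^2) cost.

-- ===== PORT A =====
def qq (x y : Int) : Int := PySem.Int.mod (2 * x + 3 * y + 29) 256

def transform (pixelinfo : List Int) : List Int :=
  let n : Int := pixelinfo.length
  let pixelreverse := (PySem.List.pyRange 0 n).map (fun i => PySem.List.pyGetD pixelinfo (n - 1 - i) 0)
  let out := (PySem.List.pyRange 0 n).map (fun i => PySem.List.pyGetD pixelinfo i 0)
  (PySem.List.pyRange 0 n).foldl (fun out i =>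
    let out := PySem.List.pySetD out 0
      (qq (PySem.List.pyGetD pixelreverse i 0) (PySem.List.pyGetD out 0 0))
    (PySem.List.pyRange 1 n).foldl (fun out j =>
      PySem.List.pySetD out j
        (qq (PySem.List.pyGetD out (j - 1) 0) (PySem.List.pyGetD out j 0))) out) out

-- ===== PORT B =====
-- loop body of Source B's inner `for j in range(len(out))` loop; indices j - t are Nat and
-- always nonneg (t ≤ j), so List.getD is exact for Python's out[j-t] here
def bandElem (out : List Int) (r : Int) (j : Nat) : Int :=
  let v : Int := if j ≤ 6 then 2 ^ (j + 1) * r else 0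
  let v := (List.range (min j 7 + 1)).foldl
    (fun v t => v + 2 ^ t * (3 * out.getD (j - t) 0 + 29)) v
  PySem.Int.mod v 256

def bandStep (out : List Int) (r : Int) : List Int :=
  (List.range out.length).foldl (fun new j => new ++ [bandElem out r j]) []

def transform_alt (pixelinfo : List Int) : List Int :=
  pixelinfo.reverse.foldl bandStep pixelinfo

-- ===== PRECONDITION & SPEC =====
def Spec_transform (pixelinfo : List Int) (out : List Int) : Prop := out = transform_alt pixelinfo
instance (pixelinfo : List Int) (out : List Int) : Decidable (Spec_transform pixelinfo out) := by unfold Spec_transform; infer_instance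

-- ===== CLAIM (what is proved, stated in full; the proofs are below) =====
def Claim_equal_transform : Prop := ∀ (pixelinfo : List Int), Dom_transform pixelinfo → Spec_transform pixelinfo (transform pixelinfo)

-- ===== LEMMAS AND PROOFS =====

-- A's sweep written functionally: carry-chained scan
def pvScan (c : Int) : List Int → List Int
  | [] => []
  | a :: as => qq c a :: pvScan (qq c a) as

-- untruncated closed form of the scan's j-th element
def pvFull (c : Int) (out : List Int) (j : Nat) : Int :=
  ((2 : Int) ^ (j + 1) * c
    + ((List.range (j + 1)).map (fun t => (2 : Int) ^ t * (3 * out.getD (j - t) 0 + 29))).sum) % 256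

def stepAj (out : List Int) (j : Int) : List Int :=
  PySem.List.pySetD out j
    (qq (PySem.List.pyGetD out (j - 1) 0) (PySem.List.pyGetD out j 0))

def sweepA (n : Int) (r : Int) (out : List Int) : List Int :=
  (PySem.List.pyRange 1 n).foldl stepAj
    (PySem.List.pySetD out 0 (qq r (PySem.List.pyGetD out 0 0)))

lemma pvScan_length (c : Int) (l : List Int) : (pvScan c l).length = l.length := by
  induction l generalizing c with
  | nil => rfl
  | cons a as ih => simp [pvScan, ih]

lemma L_rev (p : List Int) :
    (PySem.List.pyRange 0 (p.length : Int)).map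
      (fun i => PySem.List.pyGetD p ((p.length : Int) - 1 - i) 0) = p.reverse := by
  rw [PySem.List.pyRange_zero_nat, List.map_map]
  apply List.ext_getElem (by simp)
  intro i h1 h2
  simp only [List.getElem_map, List.getElem_range, Function.comp_apply, List.getElem_reverse]
  have hi : i < p.length := by simpa using h2
  have hc : ((p.length : Int) - 1 - (i : Int)) = ((p.length - 1 - i : Nat) : Int) := by
    omega
  rw [hc, PySem.List.pyGetD_natCast, List.getD_eq_getElem _ _ (by omega)]

lemma L_id (p : List Int) :
    (PySem.List.pyRange 0 (p.length : Int)).map (fun i => PySem.List.pyGetD p i 0) = p := by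
  rw [PySem.List.pyRange_zero_nat, List.map_map]
  apply List.ext_getElem (by simp)
  intro i h1 h2
  simp only [List.getElem_map, List.getElem_range, Function.comp_apply]
  rw [PySem.List.pyGetD_natCast, List.getD_eq_getElem _ _ (by simpa using h2)]

lemma transform_eq (p : List Int) :
    transform p = p.reverse.foldl (fun out r => sweepA (p.length : Int) r out) p := by
  simp only [transform, L_rev, L_id]
  have hfold := PySem.List.foldl_pyRange_zero_pyGetD' p.reverse 0
    (fun out r => sweepA (p.length : Int) r out) p
  rw [List.length_reverse] at hfold
  rw [← hfold]
  rfl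

lemma emod_absorb (m x S : Int) : (m * (x % 256) + S) % 256 = (m * x + S) % 256 := by
  have h : m * (x % 256) + S = m * x + S + 256 * (-(m * (x / 256))) := by
    rw [Int.emod_def]; ring
  rw [h, Int.add_mul_emod_self_left]

lemma qq_emod (x y : Int) : qq x y = (2 * x + 3 * y + 29) % 256 := by
  rw [qq, PySem.Int.mod_eq_emod_of_pos (by norm_num)]

lemma scan_getD (out : List Int) (c : Int) (j : Nat) (hj : j < out.length) :
    (pvScan c out).getD j 0 = pvFull c out j := by
  induction out generalizing c j with
  | nil => simp at hj
  | cons a as ih =>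
      cases j with
      | zero =>
          simp only [pvScan, List.getD_cons_zero, pvFull, qq_emod]
          norm_num
          congr 1
          ring
      | succ j =>
          have hja : j < as.length := by simpa using hj
          simp only [pvScan, List.getD_cons_succ]
          rw [ih (qq c a) j hja]
          -- pvFull (qq c a) as j = pvFull c (a :: as) (j+1)
          unfold pvFull
          rw [qq_emod]
          rw [emod_absorb ((2:Int) ^ (j+1)) (2 * c + 3 * a + 29)]
          congr 1
          rw [List.range_succ (n := j + 1), List.map_append, List.sum_append]
          have hmap : (List.range (j + 1)).map
              (fun t => (2:Int) ^ t * (3 * (a :: as).getD (j + 1 - t) 0 + 29))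
              = (List.range (j + 1)).map
              (fun t => (2:Int) ^ t * (3 * as.getD (j - t) 0 + 29)) := by
            apply List.map_congr_left
            intro t ht
            have htj : t ≤ j := by simpa [Nat.lt_succ_iff] using List.mem_range.mp ht
            have : j + 1 - t = (j - t) + 1 := by omega
            rw [this, List.getD_cons_succ]
          rw [hmap]
          simp only [List.map_cons, List.map_nil, List.sum_cons, List.sum_nil,
            Nat.sub_self, List.getD_cons_zero]
          ring

lemma band_eq_full (out : List Int) (r : Int) (j : Nat) : bandElem out r j = pvFull r out j := by
  unfold bandElem pvFull
  show PySem.Int.mod ((List.range (min j 7 + 1)).foldl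
      (fun v t => v + 2 ^ t * (3 * out.getD (j - t) 0 + 29))
      (if j ≤ 6 then 2 ^ (j + 1) * r else 0)) 256 = _
  rw [PySem.List.foldl_add, PySem.Int.mod_eq_emod_of_pos (by norm_num)]
  by_cases hj : j ≤ 6
  · rw [if_pos hj, Nat.min_eq_left (by omega)]
  · rw [if_neg hj, Nat.min_eq_right (by omega), zero_add]
    -- split range (j+1) at 8
    have hsplit : List.range (j + 1) = List.range' 0 8 ++ List.range' 8 (j - 7) := by
      rw [List.range'_append (s := 0) (m := 8) (n := j - 7) (step := 1), List.range_eq_range']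
      congr 1
      omega
    rw [hsplit, List.map_append, List.sum_append]
    have h8 : List.range 8 = List.range' 0 8 := List.range_eq_range'
    rw [← h8]
    -- tail terms plus the leading power are a multiple of 256
    have hd : (256 : Int) ∣ (2 : Int) ^ (j + 1) * r
        + ((List.range' 8 (j - 7)).map (fun t => (2:Int) ^ t * (3 * out.getD (j - t) 0 + 29))).sum := by
      apply dvd_add
      · have : (2 : Int) ^ (j + 1) = 256 * 2 ^ (j - 7) := by
          rw [show j + 1 = 8 + (j - 7) by omega, pow_add]
          norm_num
        rw [this, mul_assoc]
        exact Dvd.intro _ rfl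
      · apply List.dvd_sum
        intro x hx
        obtain ⟨t, ht, rfl⟩ := List.mem_map.mp hx
        have ht8 : 8 ≤ t := (List.mem_range'_1.mp ht).1
        have : (2 : Int) ^ t = 256 * 2 ^ (t - 8) := by
          rw [show t = 8 + (t - 8) by omega, pow_add]
          norm_num
        rw [this, mul_assoc]
        exact Dvd.intro _ rfl
    obtain ⟨K, hK⟩ := hd
    have harg : (2 : Int) ^ (j + 1) * r
        + (((List.range 8).map (fun t => (2:Int) ^ t * (3 * out.getD (j - t) 0 + 29))).sum
          + ((List.range' 8 (j - 7)).map (fun t => (2:Int) ^ t * (3 * out.getD (j - t) 0 + 29))).sum)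
        = ((List.range 8).map (fun t => (2:Int) ^ t * (3 * out.getD (j - t) 0 + 29))).sum
          + 256 * K := by
      rw [← hK]; ring
    rw [harg, Int.add_mul_emod_self_left]

lemma scan_eq_band (out : List Int) (r : Int) : pvScan r out = bandStep out r := by
  rw [bandStep, PySem.List.foldl_append_singleton_eq_map, List.nil_append]
  apply List.ext_getElem (by simp [pvScan_length])
  intro i h1 h2
  have hi : i < out.length := by rw [← pvScan_length r out]; exact h1
  simp only [List.getElem_map, List.getElem_range]
  rw [band_eq_full, ← scan_getD out r i hi, List.getD_eq_getElem _ _ h1]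

lemma inner_loop (m k : Nat) (l : List Int) (hk : 1 ≤ k) (hkm : k + m = l.length) :
    (PySem.List.pyRange (k : Int) (l.length : Int)).foldl stepAj l
      = l.take k ++ pvScan (l.getD (k - 1) 0) (l.drop k) := by
  induction m generalizing k l with
  | zero =>
      rw [PySem.List.pyRange_one_eq_nil (by exact_mod_cast Nat.le_of_eq (by omega))]
      rw [List.foldl_nil, List.take_of_length_le (by omega), List.drop_of_length_le (by omega)]
      simp [pvScan]
  | succ m ih =>
      have hkl : k < l.length := by omega
      rw [PySem.List.pyRange_one_cons (by exact_mod_cast hkl)]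
      rw [List.foldl_cons]
      have e1 : ((k : Int) - 1) = ((k - 1 : Nat) : Int) := by omega
      have estep : stepAj l (k : Int) = l.set k (qq (l.getD (k - 1) 0) (l.getD k 0)) := by
        rw [stepAj, e1, PySem.List.pyGetD_natCast, PySem.List.pyGetD_natCast,
          PySem.List.pySetD_natCast]
      rw [estep]
      set v := qq (l.getD (k - 1) 0) (l.getD k 0) with hv
      have hlen : (l.set k v).length = l.length := by simp
      have ecast : ((k : Int) + 1) = ((k + 1 : Nat) : Int) := by omega
      rw [ecast, show ((l.length : Int)) = (((l.set k v).length : Int)) by rw [hlen]]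
      rw [ih (k + 1) (l.set k v) (by omega) (by omega)]
      -- rewrite the three pieces about l.set k v
      have hset : l.set k v = l.take k ++ v :: l.drop (k + 1) := by
        rw [List.set_eq_take_append_cons_drop, if_pos hkl]
      have hlen2 : (l.take k).length = k := by rw [List.length_take]; omega
      have htake : (l.set k v).take (k + 1) = l.take k ++ [v] := by
        rw [hset, List.take_append, List.take_of_length_le (by rw [hlen2]; omega), hlen2,
          show k + 1 - k = 1 by omega]
        rfl
      have hgetD : (l.set k v).getD (k + 1 - 1) 0 = v := by
        simp only [Nat.add_sub_cancel]
        rw [List.getD_eq_getElem _ _ (by rw [hlen]; omega),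
          List.getElem_set_self (by simpa using hkl)]
      have hdrop : (l.set k v).drop (k + 1) = l.drop (k + 1) := by
        rw [hset, List.drop_append, List.drop_of_length_le (by rw [hlen2]; omega), hlen2,
          show k + 1 - k = 1 by omega, List.nil_append]
        rfl
      rw [htake, hgetD, hdrop]
      -- fold the RHS back into pvScan over l.drop k
      have hdk : l.drop k = l[k] :: l.drop (k + 1) := List.drop_eq_getElem_cons hkl
      rw [hdk, pvScan]
      have hgk : l.getD k 0 = l[k] := List.getD_eq_getElem _ _ hkl
      rw [← hgk, ← hv, List.append_assoc, List.singleton_append]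

lemma sweepA_eq_scan (n : Int) (r : Int) (out : List Int) (h : (out.length : Int) = n) :
    sweepA n r out = pvScan r out := by
  subst h
  cases out with
  | nil =>
      rw [sweepA, PySem.List.pyRange_one_eq_nil (by norm_num), List.foldl_nil]
      rfl
  | cons a as =>
      rw [sweepA, PySem.List.pyGetD_zero_cons,
        show (0 : Int) = ((0 : Nat) : Int) by norm_num, PySem.List.pySetD_natCast,
        List.set_cons_zero]
      have hinner := inner_loop as.length 1 (qq r a :: as) (by omega) (by simp [Nat.add_comm])
      rw [Nat.cast_one] at hinner
      simp only [List.length_cons] at hinner ⊢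
      rw [hinner]
      simp only [List.take_succ_cons, List.take_zero, List.drop_succ_cons, List.drop_zero,
        Nat.sub_self, List.getD_cons_zero]
      rw [pvScan, List.singleton_append]

lemma band_length (out : List Int) (r : Int) : (bandStep out r).length = out.length := by
  rw [bandStep, PySem.List.foldl_append_singleton_eq_map, List.nil_append, List.length_map,
    List.length_range]

lemma fold_eq (N : Nat) (l : List Int) : ∀ (out : List Int), out.length = N →
    l.foldl (fun o r => sweepA (N : Int) r o) out = l.foldl bandStep out := by
  induction l with
  | nil => intro out h; rfl
  | cons r rs ih =>
      intro out h
      have h1 : sweepA (N : Int) r out = bandStep out r := by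
        rw [sweepA_eq_scan (N : Int) r out (by exact_mod_cast congrArg Nat.cast h), scan_eq_band]
      simp only [List.foldl_cons, h1]
      exact ih (bandStep out r) (by rw [band_length, h])

-- ===== VERDICT (by name: the statement is the Claim_ definition above) =====
theorem transform_spec : Claim_equal_transform := by
  intro p _
  unfold Spec_transform
  rw [transform_eq, fold_eq p.length p.reverse p rfl]
  rfl
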